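-- pv_equiv track=rewrite | github.com/YingjingLu/Cai-Ji | 451/2dp_lcs.py | longest_common_subset
-- ===== SOURCE A (Python) =====
-- def longest_common_subset( s, t ):
--     """
--     count common elems ignoring order
--     """
--
--     s_dict = dict()
--     t_dict = dict()
--
--     for elem in s:
--         s_dict[ elem ] = s_dict.get( elem, 0 ) + 1
--     for elem in t:
--         t_dict[ elem ] = t_dict.get( elem, 0 ) + 1
--
--     common = 0
--     for elem in s_dict:
--         if elem in t_dict:
--             common += min( s_dict[ elem ], t_dict[ elem ] )
--     return common
-- ===== SOURCE B (Python) =====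
-- def longest_common_subset(s, t):
--     """
--     count common elems ignoring order
--     """
--     remaining = {}
--     for elem in s:
--         remaining[elem] = remaining.get(elem, 0) + 1
--     common = 0
--     for elem in t:
--         if remaining.get(elem, 0) > 0:
--             remaining[elem] -= 1
--             common += 1
--     return common
-- ===== Notes on version B (the rewrite author's own statement) =====
-- stated objective: alternative
-- what changed: B builds a frequency dict from s only and streams t once, decrementing the remaining supply and counting greedy matches, instead of building both frequency tables and summing min over s's keys.
import Mathlib
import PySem

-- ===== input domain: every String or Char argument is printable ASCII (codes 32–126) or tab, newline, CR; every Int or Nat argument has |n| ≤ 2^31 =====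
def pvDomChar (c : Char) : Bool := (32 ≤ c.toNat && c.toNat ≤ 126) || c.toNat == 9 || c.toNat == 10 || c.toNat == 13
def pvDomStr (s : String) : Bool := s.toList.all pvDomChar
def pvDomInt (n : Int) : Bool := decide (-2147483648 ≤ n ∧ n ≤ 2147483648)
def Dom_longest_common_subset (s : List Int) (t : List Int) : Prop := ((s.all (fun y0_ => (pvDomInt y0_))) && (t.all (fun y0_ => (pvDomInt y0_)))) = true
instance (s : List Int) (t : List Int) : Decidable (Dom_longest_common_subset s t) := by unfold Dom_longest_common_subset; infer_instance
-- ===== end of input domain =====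

-- B streams t once against a decrementing supply-dict built from s, instead of building
-- both frequency tables and summing min over s's keys (objective: alternative decomposition).

-- ===== PORT A =====
def longest_common_subset (s : List Int) (t : List Int) : Int :=
  let s_dict : PySem.Dict Int Int := s.foldl (fun d elem => d.insert elem (d.getD elem 0 + 1)) PySem.Dict.empty
  let t_dict : PySem.Dict Int Int := t.foldl (fun d elem => d.insert elem (d.getD elem 0 + 1)) PySem.Dict.empty
  -- s_dict[elem] / t_dict[elem] are looked up at keys known present, so getD … 0 is exact
  s_dict.keys.foldl (fun common elem =>
    if t_dict.contains elem then common + min (s_dict.getD elem 0) (t_dict.getD elem 0)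
    else common) 0

-- ===== PORT B =====
def longest_common_subset_alt (s : List Int) (t : List Int) : Int :=
  let remaining : PySem.Dict Int Int := s.foldl (fun d elem => d.insert elem (d.getD elem 0 + 1)) PySem.Dict.empty
  (t.foldl (fun st elem =>
      if st.1.getD elem 0 > 0 then (st.1.insert elem (st.1.getD elem 0 - 1), st.2 + 1)
      else st)
    (remaining, (0 : Int))).2

-- ===== PRECONDITION & SPEC =====
def Spec_longest_common_subset (s : List Int) (t : List Int) (out : Int) : Prop := out = longest_common_subset_alt s t
instance (s : List Int) (t : List Int) (out : Int) : Decidable (Spec_longest_common_subset s t out) := by unfold Spec_longest_common_subset; infer_instance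

-- ===== CLAIM (what is proved, stated in full; the proofs are below) =====
def Claim_equal_longest_common_subset : Prop := ∀ (s : List Int) (t : List Int), Dom_longest_common_subset s t → Spec_longest_common_subset s t (longest_common_subset s t)

-- ===== LEMMAS AND PROOFS =====

-- sum over a nodup list where f and g differ only at one member x
lemma sum_map_update (u : List Int) (f g : Int → Int) (x : Int) (hu : u.Nodup) (hx : x ∈ u)
    (hne : ∀ e ∈ u, e ≠ x → f e = g e) :
    (u.map f).sum = (u.map g).sum + (f x - g x) := by
  induction u with
  | nil => cases hx
  | cons a u ih =>
    simp only [List.map_cons, List.sum_cons]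
    rcases List.mem_cons.mp hx with rfl | hx'
    · have : u.map f = u.map g := List.map_congr_left (fun e he => hne e (List.mem_cons_of_mem _ he) (fun h => (List.nodup_cons.mp hu).1 (h ▸ he)))
      rw [this]; ring
    · have ha : f a = g a := hne a (List.mem_cons_self) (fun h => (List.nodup_cons.mp hu).1 (h ▸ hx'))
      rw [ha, ih (List.nodup_cons.mp hu).2 hx' (fun e he => hne e (List.mem_cons_of_mem _ he))]
      ring

-- B's streaming loop computes the sum of mins over any nodup list u covering the dict's support
lemma loopB (u : List Int) (hu : u.Nodup) :
    ∀ (t : List Int) (d : PySem.Dict Int Int) (c : Int),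
    (∀ e, 0 ≤ d.getD e 0) → (∀ e, e ∉ u → d.getD e 0 = 0) →
    (t.foldl (fun st elem =>
        if st.1.getD elem 0 > 0 then (st.1.insert elem (st.1.getD elem 0 - 1), st.2 + 1)
        else st) (d, c)).2
      = c + (u.map (fun e => min (d.getD e 0) ((t.count e : Int)))).sum := by
  intro t
  induction t with
  | nil =>
    intro d c hpos _
    simp only [List.foldl_nil, List.count_nil, Nat.cast_zero]
    have : u.map (fun e => min (d.getD e 0) (0:Int)) = u.map (fun _ => (0:Int)) :=
      List.map_congr_left (fun e _ => min_eq_right (hpos e))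
    simp [this]
  | cons x rest ih =>
    intro d c hpos hsupp
    simp only [List.foldl_cons]
    by_cases h : d.getD x 0 > 0
    · have hxu : x ∈ u := by
        by_contra hx; exact absurd (hsupp x hx) (by omega)
      simp only [h, if_pos]
      rw [ih (d.insert x (d.getD x 0 - 1)) (c + 1)
        (fun e => by
          by_cases he : e = x
          · subst he; rw [PySem.Dict.getD_insert_self]; omega
          · rw [PySem.Dict.getD_insert_of_ne _ _ _ he]; exact hpos e)
        (fun e heu => by
          have hne : e ≠ x := fun hh => heu (hh ▸ hxu)
          rw [PySem.Dict.getD_insert_of_ne _ _ _ hne]; exact hsupp e heu)]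
      rw [sum_map_update u
        (fun e => min (d.getD e 0) (((x :: rest).count e : Int)))
        (fun e => min ((d.insert x (d.getD x 0 - 1)).getD e 0) ((rest.count e : Int)))
        x hu hxu
        (fun e _ hne => by
          simp only [PySem.Dict.getD_insert_of_ne _ _ _ hne, List.count_cons,
            beq_iff_eq, if_neg (Ne.symm hne), Nat.add_zero])]
      rw [PySem.Dict.getD_insert_self, List.count_cons_self]
      push_cast
      omega
    · simp only [h, if_neg, not_false_iff]
      rw [ih d c hpos hsupp]
      congr 1
      apply congrArg
      apply List.map_congr_left
      intro e _
      by_cases he : e = x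
      · subst he
        have h0 : d.getD e 0 = 0 := by have := hpos e; omega
        rw [h0]
        omega
      · simp [Ne.symm he]

-- A's final loop as a sum over the distinct elements of s
lemma A_as_sum (s t : List Int) :
    longest_common_subset s t
      = ((PySem.Set.ofList s : List Int).map (fun e =>
          if e ∈ t then min ((s.count e : Int)) ((t.count e : Int)) else 0)).sum := by
  unfold longest_common_subset
  simp only [PySem.Dict.foldl_insert_getD_add_one_eq_counter, PySem.Dict.keys_counter]
  have : ∀ (u : List Int) (a : Int),
      u.foldl (fun common elem =>
        if (PySem.Dict.counter t).contains elem then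
          common + min ((PySem.Dict.counter s).getD elem 0) ((PySem.Dict.counter t).getD elem 0)
        else common) a
      = a + (u.map (fun e => if e ∈ t then min ((s.count e : Int)) ((t.count e : Int)) else 0)).sum := by
    intro u
    induction u with
    | nil => simp
    | cons x u ih =>
      intro a
      simp only [List.foldl_cons, List.map_cons, List.sum_cons, ih]
      by_cases hx : x ∈ t
      · simp [PySem.Dict.contains_counter, hx, PySem.Dict.getD_counter]
        ring
      · simp [PySem.Dict.contains_counter, hx]
  rw [this]; ring

-- ===== VERDICT (by name: the statement is the Claim_ definition above) =====
theorem longest_common_subset_spec : Claim_equal_longest_common_subset := by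
  intro s t _
  unfold Spec_longest_common_subset
  rw [A_as_sum]
  simp only [longest_common_subset_alt]
  rw [PySem.Dict.foldl_insert_getD_add_one_eq_counter]
  rw [loopB (PySem.Set.ofList s) (PySem.Set.nodup_ofList s) t (PySem.Dict.counter s) 0
    (fun e => by rw [PySem.Dict.getD_counter]; positivity)
    (fun e he => by
      rw [PySem.Dict.getD_counter]
      have : e ∉ s := fun hs => he ((PySem.Set.mem_ofList s e).mpr hs)
      simp [List.count_eq_zero_of_not_mem this])]
  rw [zero_add]
  apply congrArg
  apply List.map_congr_left
  intro e he
  rw [PySem.Dict.getD_counter]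
  by_cases hx : e ∈ t
  · simp [hx]
  · simp [hx, List.count_eq_zero_of_not_mem hx]
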